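-- pv_equiv track=rewrite | github.com/KJHJason/NYP-DSA-Assignment | src/hidden_sort.py | stalinsort
-- ===== SOURCE A (Python) =====
-- def stalinsort(arr):
--     if (len(arr) <= 1):
--         return arr
--
--     temp = arr[0]
--     res = []
--     for element in arr:
--         if (element >= temp):
--             res.append(element)
--             temp = element
--
--     return res
-- ===== SOURCE B (Python) =====
-- def stalinsort(arr):
--     if len(arr) <= 1:
--         return arr
--     # build the inclusive running-maxima table, then keep x where x equals its running max
--     maxes = []
--     m = arr[0]
--     for x in arr:
--         m = x if x > m else m
--         maxes.append(m)
--     return [x for x, mx in zip(arr, maxes) if x == mx]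
-- ===== Notes on version B (the rewrite author's own statement) =====
-- stated objective: alternative
-- what changed: Replaces the inline compare-and-update-temp filtering loop with a build-the-inclusive-prefix-max-table pass followed by a zip/comprehension keeping each element equal to its running maximum.
import Mathlib
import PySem

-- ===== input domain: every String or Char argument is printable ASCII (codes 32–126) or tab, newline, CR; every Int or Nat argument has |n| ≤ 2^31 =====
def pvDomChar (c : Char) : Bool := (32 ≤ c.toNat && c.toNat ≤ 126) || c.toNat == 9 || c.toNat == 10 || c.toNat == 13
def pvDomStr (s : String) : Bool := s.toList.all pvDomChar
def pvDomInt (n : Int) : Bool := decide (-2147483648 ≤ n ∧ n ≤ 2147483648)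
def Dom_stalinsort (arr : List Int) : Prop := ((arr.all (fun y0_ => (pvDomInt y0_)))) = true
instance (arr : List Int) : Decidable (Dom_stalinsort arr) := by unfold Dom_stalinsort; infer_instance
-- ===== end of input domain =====

-- B replaces A's inline compare-and-update-temp loop with a prefix-max table + filter; same cost.

-- ===== PORT A =====
def stalinsort (arr : List Int) : List Int :=
  if arr.length ≤ 1 then arr else
  match arr with
  | [] => []
  | a :: _ =>
    (arr.foldl (fun (st : Int × List Int) e =>
        if e ≥ st.1 then (e, st.2 ++ [e]) else st) (a, ([] : List Int))).2

-- ===== PORT B =====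
-- inclusive running maxima (B's `maxes` loop)
def scanMax (m : Int) : List Int → List Int
  | [] => []
  | x :: xs => let m' := if x > m then x else m; m' :: scanMax m' xs

def stalinsort_alt (arr : List Int) : List Int :=
  if arr.length ≤ 1 then arr else
  match arr with
  | [] => []
  | a :: _ =>
    ((arr.zip (scanMax a arr)).filter (fun p => p.1 == p.2)).map Prod.fst

-- ===== PRECONDITION & SPEC =====
def Spec_stalinsort (arr : List Int) (out : List Int) : Prop := out = stalinsort_alt arr
instance (arr : List Int) (out : List Int) : Decidable (Spec_stalinsort arr out) := by unfold Spec_stalinsort; infer_instance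

-- ===== CLAIM (what is proved, stated in full; the proofs are below) =====
def Claim_equal_stalinsort : Prop := ∀ (arr : List Int), Dom_stalinsort arr → Spec_stalinsort arr (stalinsort arr)

-- ===== LEMMAS AND PROOFS =====
theorem stalin_fold_eq (xs : List Int) : ∀ (m : Int) (acc : List Int),
    (xs.foldl (fun (st : Int × List Int) e =>
        if e ≥ st.1 then (e, st.2 ++ [e]) else st) (m, acc)).2
      = acc ++ ((xs.zip (scanMax m xs)).filter (fun p => p.1 == p.2)).map Prod.fst := by
  induction xs with
  | nil => intro m acc; simp
  | cons x xs ih =>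
    intro m acc
    simp only [List.foldl_cons, scanMax, List.zip_cons_cons, List.filter]
    by_cases h : x ≥ m
    · have hm : (if x > m then x else m) = x := by split_ifs with h' <;> omega
      simp only [hm, if_pos h, beq_self_eq_true]
      simp [ih x (acc ++ [x])]
    · have hm : (if x > m then x else m) = m := by split_ifs with h' <;> omega
      have hne : (x == m) = false := by
        simp only [beq_eq_false_iff_ne]; omega
      simp only [hm, if_neg h, hne]
      exact ih m acc

-- ===== VERDICT (by name: the statement is the Claim_ definition above) =====
theorem stalinsort_spec : Claim_equal_stalinsort := by
  intro arr _
  unfold Spec_stalinsort stalinsort stalinsort_alt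
  by_cases h : arr.length ≤ 1
  · simp [h]
  · simp only [if_neg h]
    match arr with
    | [] => rfl
    | a :: rest => simpa using stalin_fold_eq (a :: rest) a []
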